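-- pv_equiv track=rewrite | github.com/Raggahmuff1n/Test | modules_diagram_generator.py | _determine_architecture_type
-- ===== SOURCE A (Python) =====
-- from typing import Dict, List, Optional
--
-- def _determine_architecture_type(patterns: List[Dict], requirements: Dict) -> str:
--     """Determine the type of architecture to generate"""
--
--     # Check patterns for architecture type
--     pattern_names = [p.get("name", "").lower() for p in patterns]
--
--     if any("microservice" in p for p in pattern_names):
--         return "microservices"
--     elif any("data" in p or "analytics" in p for p in pattern_names):
--         return "data_platform"
--     elif any("ai" in p or "machine learning" in p for p in pattern_names):
--         return "ai_solution"
--     elif any("hybrid" in p for p in pattern_names):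
--         return "hybrid"
--     else:
--         return "standard"
-- ===== SOURCE B (Python) =====
-- def _determine_architecture_type(patterns, requirements):
--     """One pass over patterns collecting boolean flags, then one precedence-ordered decision."""
--     has_micro = has_data = has_ai = has_hybrid = False
--     for p in patterns:
--         name = p.get("name", "").lower()
--         has_micro = has_micro or "microservice" in name
--         has_data = has_data or "data" in name or "analytics" in name
--         has_ai = has_ai or "ai" in name or "machine learning" in name
--         has_hybrid = has_hybrid or "hybrid" in name
--     if has_micro:
--         return "microservices"
--     if has_data:
--         return "data_platform"
--     if has_ai:
--         return "ai_solution"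
--     if has_hybrid:
--         return "hybrid"
--     return "standard"
-- ===== Notes on version B (the rewrite author's own statement) =====
-- stated objective: alternative
-- what changed: B replaces A's list comprehension plus four separate any(...) scans with a single fold over the patterns that lowercases each name once and ORs four boolean flags, followed by a flat precedence if-chain.
import Mathlib
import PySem

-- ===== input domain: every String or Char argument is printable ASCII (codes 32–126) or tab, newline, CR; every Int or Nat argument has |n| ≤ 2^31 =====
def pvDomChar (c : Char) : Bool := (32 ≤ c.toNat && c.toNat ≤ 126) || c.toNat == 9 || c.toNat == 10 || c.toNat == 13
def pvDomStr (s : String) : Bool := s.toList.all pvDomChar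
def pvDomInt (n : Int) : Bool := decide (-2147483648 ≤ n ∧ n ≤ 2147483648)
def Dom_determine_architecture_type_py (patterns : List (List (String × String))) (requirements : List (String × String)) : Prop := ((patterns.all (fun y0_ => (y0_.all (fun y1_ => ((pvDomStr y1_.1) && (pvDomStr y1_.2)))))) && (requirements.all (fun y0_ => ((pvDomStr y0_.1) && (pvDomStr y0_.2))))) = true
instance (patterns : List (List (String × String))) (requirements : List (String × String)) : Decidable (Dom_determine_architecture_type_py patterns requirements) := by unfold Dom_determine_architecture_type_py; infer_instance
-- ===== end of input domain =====

-- B merges A's four any(...) scans into one flag-accumulating fold; same cost, different decomposition.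

-- ===== PORT A =====
def determine_architecture_type_py (patterns : List (List (String × String))) (requirements : List (String × String)) : String :=
  let pattern_names := patterns.map (fun p => PySem.Str.lower ((PySem.Dict.ofList p).getD "name" ""))
  if pattern_names.any (fun p => PySem.Str.isIn "microservice" p) then "microservices"
  else if pattern_names.any (fun p => PySem.Str.isIn "data" p || PySem.Str.isIn "analytics" p) then "data_platform"
  else if pattern_names.any (fun p => PySem.Str.isIn "ai" p || PySem.Str.isIn "machine learning" p) then "ai_solution"
  else if pattern_names.any (fun p => PySem.Str.isIn "hybrid" p) then "hybrid"
  else "standard"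

-- ===== PORT B =====
def determine_architecture_type_py_alt (patterns : List (List (String × String))) (requirements : List (String × String)) : String :=
  let flags := patterns.foldl
    (fun (f : Bool × Bool × Bool × Bool) p =>
      let name := PySem.Str.lower ((PySem.Dict.ofList p).getD "name" "")
      (f.1 || PySem.Str.isIn "microservice" name,
       f.2.1 || PySem.Str.isIn "data" name || PySem.Str.isIn "analytics" name,
       f.2.2.1 || PySem.Str.isIn "ai" name || PySem.Str.isIn "machine learning" name,
       f.2.2.2 || PySem.Str.isIn "hybrid" name))
    (false, false, false, false)
  if flags.1 then "microservices"
  else if flags.2.1 then "data_platform"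
  else if flags.2.2.1 then "ai_solution"
  else if flags.2.2.2 then "hybrid"
  else "standard"

-- ===== PRECONDITION & SPEC =====
def Spec_determine_architecture_type_py (patterns : List (List (String × String))) (requirements : List (String × String)) (out : String) : Prop := out = determine_architecture_type_py_alt patterns requirements
instance (patterns : List (List (String × String))) (requirements : List (String × String)) (out : String) : Decidable (Spec_determine_architecture_type_py patterns requirements out) := by unfold Spec_determine_architecture_type_py; infer_instance

-- ===== CLAIM (what is proved, stated in full; the proofs are below) =====
def Claim_equal_determine_architecture_type_py : Prop := ∀ (patterns : List (List (String × String))) (requirements : List (String × String)), Dom_determine_architecture_type_py patterns requirements → Spec_determine_architecture_type_py patterns requirements (determine_architecture_type_py patterns requirements)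

-- ===== LEMMAS AND PROOFS =====

/-- The flag-accumulating fold computes the OR of the init with the four `any` scans. -/
theorem pv_flags_fold (l : List (List (String × String))) (a b c d : Bool) :
    l.foldl (fun (f : Bool × Bool × Bool × Bool) p =>
        (f.1 || PySem.Str.isIn "microservice" (PySem.Str.lower ((PySem.Dict.ofList p).getD "name" "")),
         f.2.1 || PySem.Str.isIn "data" (PySem.Str.lower ((PySem.Dict.ofList p).getD "name" "")) || PySem.Str.isIn "analytics" (PySem.Str.lower ((PySem.Dict.ofList p).getD "name" "")),
         f.2.2.1 || PySem.Str.isIn "ai" (PySem.Str.lower ((PySem.Dict.ofList p).getD "name" "")) || PySem.Str.isIn "machine learning" (PySem.Str.lower ((PySem.Dict.ofList p).getD "name" "")),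
         f.2.2.2 || PySem.Str.isIn "hybrid" (PySem.Str.lower ((PySem.Dict.ofList p).getD "name" "")))) (a, b, c, d)
      = (a || l.any (fun p => PySem.Str.isIn "microservice" (PySem.Str.lower ((PySem.Dict.ofList p).getD "name" ""))),
         b || l.any (fun p => PySem.Str.isIn "data" (PySem.Str.lower ((PySem.Dict.ofList p).getD "name" "")) || PySem.Str.isIn "analytics" (PySem.Str.lower ((PySem.Dict.ofList p).getD "name" ""))),
         c || l.any (fun p => PySem.Str.isIn "ai" (PySem.Str.lower ((PySem.Dict.ofList p).getD "name" "")) || PySem.Str.isIn "machine learning" (PySem.Str.lower ((PySem.Dict.ofList p).getD "name" ""))),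
         d || l.any (fun p => PySem.Str.isIn "hybrid" (PySem.Str.lower ((PySem.Dict.ofList p).getD "name" "")))) := by
  induction l generalizing a b c d with
  | nil => simp
  | cons x xs ih =>
    simp only [List.foldl_cons, List.any_cons]
    rw [ih]
    simp [Bool.or_assoc]

theorem pv_equal : ∀ (patterns : List (List (String × String))) (requirements : List (String × String)),
    determine_architecture_type_py patterns requirements = determine_architecture_type_py_alt patterns requirements := by
  intro patterns requirements
  simp only [determine_architecture_type_py, determine_architecture_type_py_alt]
  rw [pv_flags_fold]
  simp [List.any_map, Function.comp_def]

-- ===== VERDICT (by name: the statement is the Claim_ definition above) =====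
theorem determine_architecture_type_py_spec : Claim_equal_determine_architecture_type_py := by
  intro patterns requirements _
  unfold Spec_determine_architecture_type_py
  exact pv_equal patterns requirements
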